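-- pv_equiv track=rewrite | github.com/SteveParson/qtProperTree | propertree/qt_plist_window.py | _format_data_string
-- ===== SOURCE A (Python) =====
-- def _format_data_string(plist_text):
--     """Collapse multi-line <data> tags into single lines for Xcode style."""
--     new_plist = []
--     data_tag = ""
--     for x in plist_text.split("\n"):
--         x_stripped = x.strip()
--         if not data_tag:
--             if x_stripped.startswith("<data>") and not x_stripped.endswith("</data>"):
--                 data_tag = x
--                 continue
--             new_plist.append(x)
--             continue
--         data_tag += x_stripped
--         if x_stripped == "</data>":
--             new_plist.append(data_tag)
--             data_tag = ""
--     return "\n".join(new_plist)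
-- ===== SOURCE B (Python) =====
-- def _split_at_open(chunk):
--     """First line that opens a multi-line <data> block, with the lines around it."""
--     for k in range(len(chunk)):
--         s = chunk[k].strip()
--         if s.startswith("<data>") and not s.endswith("</data>"):
--             return chunk[:k], chunk[k], chunk[k + 1:]
--     return None
--
--
-- def _format_data_string(plist_text):
--     """Collapse multi-line <data> tags into single lines for Xcode style."""
--     lines = plist_text.split("\n")
--     # Stage 1: partition into chunks delimited by lines that strip to "</data>".
--     chunks, cur = [], []
--     for x in lines:
--         if x.strip() == "</data>":
--             chunks.append((cur, x))
--             cur = []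
--         else:
--             cur.append(x)
--     # Stage 2: each closed chunk collapses from its first opener to its closer.
--     out = []
--     for chunk, closer in chunks:
--         found = _split_at_open(chunk)
--         if found is None:
--             out += chunk + [closer]
--         else:
--             pre, opener, post = found
--             out += pre + [opener + "".join(y.strip() for y in post) + closer.strip()]
--     # Stage 3: the unterminated tail keeps only the lines before any opener.
--     found = _split_at_open(cur)
--     out += cur if found is None else found[0]
--     return "\n".join(out)
-- ===== Notes on version B (the rewrite author's own statement) =====
-- stated objective: alternative
-- what changed: Replaced A's single stateful pass (a data_tag accumulator doubling as an in-block flag) by a staged pipeline: partition the lines into chunks delimited by </data> lines, then collapse each chunk independently at its first <data> opener, then handle the unterminated tail.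
import Mathlib
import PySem

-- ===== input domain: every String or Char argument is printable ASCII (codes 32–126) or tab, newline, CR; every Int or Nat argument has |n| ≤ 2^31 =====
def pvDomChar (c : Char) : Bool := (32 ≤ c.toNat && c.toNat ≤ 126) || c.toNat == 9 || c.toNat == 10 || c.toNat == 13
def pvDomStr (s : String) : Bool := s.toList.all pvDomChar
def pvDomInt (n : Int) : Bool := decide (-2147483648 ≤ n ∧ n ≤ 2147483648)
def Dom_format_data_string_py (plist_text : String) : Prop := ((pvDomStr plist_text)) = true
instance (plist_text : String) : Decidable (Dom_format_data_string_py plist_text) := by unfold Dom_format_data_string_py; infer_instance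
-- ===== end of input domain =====

-- B replaces A's single stateful pass by a staged pipeline (partition the lines into
-- </data>-delimited chunks, collapse each chunk at its first opener, handle the tail);
-- same return value (objective: alternative).

-- ===== PORT A =====
-- state: (new_plist, data_tag); one fold step per line, exactly A's branches
def pvAStep (st : List String × String) (x : String) : List String × String :=
  let x_stripped := PySem.Str.strip x
  if st.2 == "" then
    if PySem.Str.startswith x_stripped "<data>" && !PySem.Str.endswith x_stripped "</data>" then
      (st.1, x)
    else
      (st.1 ++ [x], st.2)
  else
    let data_tag := st.2 ++ x_stripped
    if x_stripped == "</data>" then (st.1 ++ [data_tag], "") else (st.1, data_tag)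

def format_data_string_py (plist_text : String) : String :=
  PySem.Str.join "\n" ((((PySem.Str.split? plist_text "\n").getD []).foldl pvAStep ([], "")).1)

-- ===== PORT B =====
-- Source B's _split_at_open: index loop returning (chunk[:k], chunk[k], chunk[k+1:]) at the
-- first opener, None if there is none; transcribed as the equivalent first-match recursion
def pvSplitOpen : List String → Option (List String × String × List String)
  | [] => none
  | y :: rest =>
    let s := PySem.Str.strip y
    if PySem.Str.startswith s "<data>" && !PySem.Str.endswith s "</data>" then
      some ([], y, rest)
    else
      match pvSplitOpen rest with
      | none => none
      | some (pre, o, post) => some (y :: pre, o, post)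

-- Stage 1 loop body: append (cur, closer) to chunks on a "</data>" line, else grow cur
def pvSplitStep (st : List (List String × String) × List String) (x : String) :
    List (List String × String) × List String :=
  if PySem.Str.strip x == "</data>" then (st.1 ++ [(st.2, x)], []) else (st.1, st.2 ++ [x])

-- Stage 2 body: one chunk's contribution to out
def pvProcess (chunk : List String) (closer : String) : List String :=
  match pvSplitOpen chunk with
  | none => chunk ++ [closer]
  | some (pre, o, post) =>
      pre ++ [o ++ PySem.Str.join "" (post.map PySem.Str.strip) ++ PySem.Str.strip closer]

-- Stage 3: the unterminated tail keeps only the lines before any opener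
def pvTailOut (cur : List String) : List String :=
  match pvSplitOpen cur with
  | none => cur
  | some (pre, _, _) => pre

def format_data_string_py_alt (plist_text : String) : String :=
  let lines := (PySem.Str.split? plist_text "\n").getD []
  let st := lines.foldl pvSplitStep ([], [])
  PySem.Str.join "\n" (st.1.flatMap (fun c => pvProcess c.1 c.2) ++ pvTailOut st.2)

-- ===== PRECONDITION & SPEC =====
def Spec_format_data_string_py (plist_text : String) (out : String) : Prop := out = format_data_string_py_alt plist_text
instance (plist_text : String) (out : String) : Decidable (Spec_format_data_string_py plist_text out) := by unfold Spec_format_data_string_py; infer_instance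

-- ===== CLAIM (what is proved, stated in full; the proofs are below) =====
def Claim_equal_format_data_string_py : Prop := ∀ (plist_text : String), Dom_format_data_string_py plist_text → Spec_format_data_string_py plist_text (format_data_string_py plist_text)

-- ===== LEMMAS AND PROOFS =====

-- proof-side middle form of A's fold: outer walk / in-block walk
mutual
def pvBOuter : List String → List String
  | [] => []
  | x :: rest =>
    let s := PySem.Str.strip x
    if PySem.Str.startswith s "<data>" && !PySem.Str.endswith s "</data>" then
      pvBInner x rest
    else
      x :: pvBOuter rest
def pvBInner (block : String) : List String → List String
  | [] => []
  | y :: rest =>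
    let t := PySem.Str.strip y
    let block' := block ++ t
    if t == "</data>" then block' :: pvBOuter rest else pvBInner block' rest
end

-- proof-side front recursion of Stage 1's fold
def pvSplitR : List String → List (List String × String) × List String
  | [] => ([], [])
  | x :: rest =>
    let r := pvSplitR rest
    if PySem.Str.strip x == "</data>" then (([], x) :: r.1, r.2)
    else
      match r.1 with
      | [] => ([], x :: r.2)
      | (c, cl) :: cs => ((x :: c, cl) :: cs, r.2)

def pvOut (p : List (List String × String) × List String) : List String :=
  p.1.flatMap (fun c => pvProcess c.1 c.2) ++ pvTailOut p.2

def pvInOut (d : String) (p : List (List String × String) × List String) : List String :=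
  match p.1 with
  | [] => []
  | (c, cl) :: cs =>
      (d ++ PySem.Str.join "" (c.map PySem.Str.strip) ++ PySem.Str.strip cl) :: pvOut (cs, p.2)

theorem pv_append_ne_empty (d s : String) (h : d ≠ "") : d ++ s ≠ "" := by
  intro hc
  apply h
  have := congrArg String.toList hc
  simp at this
  exact this.1

theorem pv_strip_startswith_ne (x : String)
    (h : PySem.Str.startswith (PySem.Str.strip x) "<data>" = true) : x ≠ "" := by
  rintro rfl
  revert h
  decide

-- A's fold equals the outer/inner walk
theorem pv_main : ∀ (lines : List String) (acc : List String) (d : String),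
    ((lines.foldl pvAStep (acc, "")).1 = acc ++ pvBOuter lines) ∧
    (d ≠ "" → (lines.foldl pvAStep (acc, d)).1 = acc ++ pvBInner d lines) := by
  intro lines
  induction lines with
  | nil => intro acc d; simp [pvBOuter, pvBInner]
  | cons x rest ih =>
    intro acc d
    constructor
    · rw [List.foldl_cons]
      by_cases hc : (PySem.Str.startswith (PySem.Str.strip x) "<data>"
          && !PySem.Str.endswith (PySem.Str.strip x) "</data>") = true
      · have hx : x ≠ "" := pv_strip_startswith_ne x (by
          rcases Bool.and_eq_true .. |>.mp hc with ⟨h1, _⟩; exact h1)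
        simp only [pvAStep, beq_self_eq_true, if_true, hc]
        rw [(ih acc x).2 hx]
        simp only [pvBOuter, hc, if_true]
      · have hc' : (PySem.Str.startswith (PySem.Str.strip x) "<data>"
            && !PySem.Str.endswith (PySem.Str.strip x) "</data>") = false := by
          simpa using hc
        simp only [pvAStep, beq_self_eq_true, if_true, hc', Bool.false_eq_true, if_false]
        rw [(ih (acc ++ [x]) "").1]
        simp only [pvBOuter, hc', Bool.false_eq_true, if_false, List.append_assoc,
          List.singleton_append]
    · intro hd
      rw [List.foldl_cons]
      have hdb : (d == "") = false := by simp [hd]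
      by_cases he : (PySem.Str.strip x == "</data>") = true
      · simp only [pvAStep, hdb, Bool.false_eq_true, if_false, he, if_true]
        rw [(ih (acc ++ [d ++ PySem.Str.strip x]) "").1]
        simp only [pvBInner, he, if_true, List.append_assoc, List.singleton_append]
      · have he' : (PySem.Str.strip x == "</data>") = false := by
          simpa using he
        simp only [pvAStep, hdb, Bool.false_eq_true, if_false, he']
        rw [(ih acc (d ++ PySem.Str.strip x)).2 (pv_append_ne_empty d _ hd)]
        simp only [pvBInner, he', Bool.false_eq_true, if_false]

-- a closer line is never an opener
theorem pv_closer_not_open (x : String) (h : (PySem.Str.strip x == "</data>") = true) :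
    (PySem.Str.startswith (PySem.Str.strip x) "<data>"
      && !PySem.Str.endswith (PySem.Str.strip x) "</data>") = false := by
  rw [eq_of_beq h]
  decide

theorem pv_intercalate_nil (l : List (List Char)) : List.intercalate [] l = l.flatten := by
  induction l with
  | nil => simp [List.intercalate]
  | cons a t ih => cases t <;> simp_all [List.intercalate, List.intersperse]

theorem pv_join_cons (a : String) (l : List String) :
    PySem.Str.join "" (a :: l) = a ++ PySem.Str.join "" l := by
  simp [PySem.Str.join, PySem.Chars.join, pv_intercalate_nil]

theorem pv_tail_cons_not (x : String) (l : List String)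
    (h : (PySem.Str.startswith (PySem.Str.strip x) "<data>"
      && !PySem.Str.endswith (PySem.Str.strip x) "</data>") = false) :
    pvTailOut (x :: l) = x :: pvTailOut l := by
  simp only [pvTailOut, pvSplitOpen, h, Bool.false_eq_true, if_false]
  cases pvSplitOpen l with
  | none => rfl
  | some p => rcases p with ⟨pre, o, post⟩; rfl

theorem pv_process_cons_not (x : String) (c : List String) (cl : String)
    (h : (PySem.Str.startswith (PySem.Str.strip x) "<data>"
      && !PySem.Str.endswith (PySem.Str.strip x) "</data>") = false) :
    pvProcess (x :: c) cl = x :: pvProcess c cl := by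
  simp only [pvProcess, pvSplitOpen, h, Bool.false_eq_true, if_false]
  cases pvSplitOpen c with
  | none => rfl
  | some p => rcases p with ⟨pre, o, post⟩; rfl

-- the outer/inner walk equals B's staged output over the front-recursive split
theorem pv_stage : ∀ (lines : List String),
    pvBOuter lines = pvOut (pvSplitR lines) ∧
    ∀ d, pvBInner d lines = pvInOut d (pvSplitR lines) := by
  intro lines
  induction lines with
  | nil =>
    constructor
    · simp [pvBOuter, pvSplitR, pvOut, pvTailOut, pvSplitOpen]
    · intro d; simp [pvBInner, pvSplitR, pvInOut]
  | cons x rest ih =>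
    by_cases hcl : (PySem.Str.strip x == "</data>") = true
    · -- closer line
      have hop := pv_closer_not_open x hcl
      constructor
      · simp only [pvBOuter, hop, Bool.false_eq_true, if_false, ih.1]
        simp only [pvSplitR, hcl, if_true, pvOut, List.flatMap_cons, pvProcess,
          pvSplitOpen, List.nil_append, List.cons_append]
      · intro d
        simp only [pvBInner, hcl, if_true, ih.1]
        simp only [pvSplitR, hcl, if_true, pvInOut, pvOut]
        rw [eq_of_beq hcl]
        simp [PySem.Str.join]
    · -- not a closer
      have hcl' : (PySem.Str.strip x == "</data>") = false := by simpa using hcl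
      by_cases hop : (PySem.Str.startswith (PySem.Str.strip x) "<data>"
          && !PySem.Str.endswith (PySem.Str.strip x) "</data>") = true
      · -- opener
        constructor
        · simp only [pvBOuter, hop, if_true, (ih.2 x)]
          simp only [pvSplitR, hcl', Bool.false_eq_true, if_false]
          rcases hr : (pvSplitR rest).1 with _ | ⟨⟨c, cl⟩, cs⟩
          · simp only [pvInOut, hr, pvOut, List.flatMap_nil, List.nil_append,
              pvTailOut, pvSplitOpen, hop, if_true]
          · simp only [pvInOut, hr, pvOut, List.flatMap_cons, pvProcess,
              pvSplitOpen, hop, if_true, List.nil_append,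
              List.cons_append]
        · intro d
          simp only [pvBInner, hcl', Bool.false_eq_true, if_false, ih.2 (d ++ PySem.Str.strip x)]
          simp only [pvSplitR, hcl', Bool.false_eq_true, if_false]
          rcases hr : (pvSplitR rest).1 with _ | ⟨⟨c, cl⟩, cs⟩
          · simp only [pvInOut, hr]
          · simp only [pvInOut, hr, List.map_cons, pv_join_cons, String.append_assoc]
      · -- plain line
        have hop' : (PySem.Str.startswith (PySem.Str.strip x) "<data>"
            && !PySem.Str.endswith (PySem.Str.strip x) "</data>") = false := by simpa using hop
        constructor
        · simp only [pvBOuter, hop', Bool.false_eq_true, if_false, ih.1]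
          simp only [pvSplitR, hcl', Bool.false_eq_true, if_false]
          rcases hr : (pvSplitR rest).1 with _ | ⟨⟨c, cl⟩, cs⟩
          · simp only [pvOut, hr, List.flatMap_nil, List.nil_append,
              pv_tail_cons_not x _ hop']
          · simp only [pvOut, hr, List.flatMap_cons, pv_process_cons_not x c cl hop',
              List.cons_append]
        · intro d
          simp only [pvBInner, hcl', Bool.false_eq_true, if_false, ih.2 (d ++ PySem.Str.strip x)]
          simp only [pvSplitR, hcl', Bool.false_eq_true, if_false]
          rcases hr : (pvSplitR rest).1 with _ | ⟨⟨c, cl⟩, cs⟩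
          · simp only [pvInOut, hr]
          · simp only [pvInOut, hr, List.map_cons, pv_join_cons, String.append_assoc]

-- Stage 1's fold equals the front recursion (generalized over the running state)
theorem pv_fold_split : ∀ (xs : List String) (cs : List (List String × String)) (cur : List String),
    xs.foldl pvSplitStep (cs, cur) =
      (match (pvSplitR xs).1 with
       | [] => (cs, cur ++ (pvSplitR xs).2)
       | (c, cl) :: rest => (cs ++ (cur ++ c, cl) :: rest, (pvSplitR xs).2)) := by
  intro xs
  induction xs with
  | nil => intro cs cur; simp [pvSplitR]
  | cons x rest ih =>
    intro cs cur
    rw [List.foldl_cons]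
    by_cases hcl : (PySem.Str.strip x == "</data>") = true
    · simp only [pvSplitStep, hcl, if_true]
      rw [ih (cs ++ [(cur, x)]) []]
      simp only [pvSplitR, hcl, if_true]
      rcases hr : (pvSplitR rest).1 with _ | ⟨⟨c, cl⟩, cs'⟩ <;>
        simp [List.append_assoc]
    · have hcl' : (PySem.Str.strip x == "</data>") = false := by simpa using hcl
      simp only [pvSplitStep, hcl', Bool.false_eq_true, if_false]
      rw [ih cs (cur ++ [x])]
      simp only [pvSplitR, hcl', Bool.false_eq_true, if_false]
      rcases hr : (pvSplitR rest).1 with _ | ⟨⟨c, cl⟩, cs'⟩ <;>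
        simp [List.append_assoc]

theorem pv_alt_out (lines : List String) :
    ((lines.foldl pvSplitStep ([], [])).1.flatMap (fun c => pvProcess c.1 c.2)
      ++ pvTailOut (lines.foldl pvSplitStep ([], [])).2) = pvOut (pvSplitR lines) := by
  rw [pv_fold_split lines [] []]
  rcases hr : (pvSplitR lines).1 with _ | ⟨⟨c, cl⟩, cs⟩ <;>
    simp [pvOut, hr]

-- ===== VERDICT (by name: the statement is the Claim_ definition above) =====
theorem format_data_string_py_spec : Claim_equal_format_data_string_py := by
  intro plist_text _
  unfold Spec_format_data_string_py format_data_string_py format_data_string_py_alt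
  rw [(pv_main ((PySem.Str.split? plist_text "\n").getD []) [] "").1]
  simp only [List.nil_append]
  rw [(pv_stage ((PySem.Str.split? plist_text "\n").getD [])).1]
  rw [pv_alt_out]
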